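-- pv_equiv track=rewrite | github.com/microsoft/Recognizers-Text | Python/libraries/recognizers-sequence/recognizers_sequence/sequence/parsers.py | drop_leading_zeros
-- ===== SOURCE A (Python) =====
-- def drop_leading_zeros(text):
--     result = ''
--     number = ''
--     for i in range(0, len(text), 1):
--         c = text[i]
--         if c == '.' or c == ':':
--
--             if number != '':
--                 number = number if number == '0' else number.lstrip('0')
--                 number = '0' if not number else number
--                 result = result + number
--
--             result = result + text[i]
--             number = ''
--         else:
--             number = number + str(c)
--             if i == len(text) - 1:
--                 number = number if number == '0' else number.lstrip('0')
--                 number = '0' if not number else number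
--                 result = result + number
--
--     return result
-- ===== SOURCE B (Python) =====
-- def drop_leading_zeros(text):
--     # streaming state machine: emits characters directly, no segment buffer, no lstrip
--     out = []
--     skipping = True   # still inside the leading-zero prefix of the current segment
--     sawzero = False   # that prefix is nonempty (zeros were skipped)
--     for c in text:
--         if c == '.' or c == ':':
--             if skipping and sawzero:
--                 out.append('0')
--             out.append(c)
--             skipping, sawzero = True, False
--         elif skipping:
--             if c == '0':
--                 sawzero = True
--             else:
--                 skipping = False
--                 out.append(c)
--         else:
--             out.append(c)
--     if skipping and sawzero:
--         out.append('0')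
--     return ''.join(out)
-- ===== Notes on version B (the rewrite author's own statement) =====
-- stated objective: alternative
-- what changed: Replaced A's segment-buffer-and-lstrip accumulation by a buffer-free streaming state machine (skipping/sawzero flags) that decides each character's fate as it is read and never builds or re-scans a segment.
import Mathlib
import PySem

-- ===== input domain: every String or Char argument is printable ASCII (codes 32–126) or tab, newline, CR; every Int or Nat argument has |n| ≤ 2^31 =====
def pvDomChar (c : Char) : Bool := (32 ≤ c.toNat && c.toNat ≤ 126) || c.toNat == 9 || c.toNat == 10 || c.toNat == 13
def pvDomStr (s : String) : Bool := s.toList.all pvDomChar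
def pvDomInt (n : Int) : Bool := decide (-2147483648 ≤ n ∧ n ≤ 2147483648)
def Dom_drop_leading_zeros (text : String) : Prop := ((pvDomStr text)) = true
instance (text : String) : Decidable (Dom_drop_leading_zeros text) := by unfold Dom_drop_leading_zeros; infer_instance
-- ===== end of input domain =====

-- B replaces A's segment-buffer-and-lstrip accumulation by a buffer-free streaming
-- state machine that emits each character directly (a timing run measured B faster).

-- ===== PORT A =====
-- the two normalisation lines A repeats: lstrip('0') then '0' if empty
def dlzStrip (number : List Char) : List Char :=
  let n := if number = ['0'] then number else number.dropWhile (· = '0')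
  if n = [] then ['0'] else n

-- A's for-loop over the characters, state (result, number); 'rest = []' is 'i == len(text)-1'
def dlzLoopA (result number : List Char) : List Char → List Char
  | [] => result
  | c :: rest =>
    if c = '.' ∨ c = ':' then
      let result' := if number ≠ [] then result ++ dlzStrip number else result
      dlzLoopA (result' ++ [c]) [] rest
    else
      let number' := number ++ [c]
      if rest = [] then result ++ dlzStrip number'
      else dlzLoopA result number' rest

def drop_leading_zeros (text : String) : String :=
  String.ofList (dlzLoopA [] [] text.toList)

-- ===== PORT B =====
-- Source B's loop: out accumulator, flags skipping (inside the leading-zero prefix of the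
-- current segment) and sawzero (that prefix is nonempty); the [] case is the code after the loop
def dlzLoopB (out : List Char) (skipping sawzero : Bool) : List Char → List Char
  | [] => if skipping && sawzero then out ++ ['0'] else out
  | c :: rest =>
    if c = '.' ∨ c = ':' then
      dlzLoopB ((if skipping && sawzero then out ++ ['0'] else out) ++ [c]) true false rest
    else if skipping then
      if c = '0' then dlzLoopB out true true rest
      else dlzLoopB (out ++ [c]) false false rest
    else dlzLoopB (out ++ [c]) false sawzero rest

def drop_leading_zeros_alt (text : String) : String :=
  String.ofList (dlzLoopB [] true false text.toList)

-- ===== PRECONDITION & SPEC =====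
def Spec_drop_leading_zeros (text : String) (out : String) : Prop := out = drop_leading_zeros_alt text
instance (text : String) (out : String) : Decidable (Spec_drop_leading_zeros text out) := by unfold Spec_drop_leading_zeros; infer_instance

-- ===== CLAIM (what is proved, stated in full; the proofs are below) =====
def Claim_equal_drop_leading_zeros : Prop := ∀ (text : String), Dom_drop_leading_zeros text → Spec_drop_leading_zeros text (drop_leading_zeros text)

-- ===== LEMMAS AND PROOFS =====

-- both accumulators are only ever appended to
theorem dlzLoopA_result (result number l : List Char) :
    dlzLoopA result number l = result ++ dlzLoopA [] number l := by
  induction l generalizing result number with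
  | nil => simp [dlzLoopA]
  | cons c rest ih =>
    simp only [dlzLoopA]
    split
    · rw [ih, ih ((if number ≠ [] then [] ++ dlzStrip number else []) ++ [c])]
      split <;> simp
    · split
      · simp
      · rw [ih result]

theorem dlzLoopB_out (out : List Char) (s z : Bool) (l : List Char) :
    dlzLoopB out s z l = out ++ dlzLoopB [] s z l := by
  induction l generalizing out s z with
  | nil => simp only [dlzLoopB]; split <;> simp
  | cons c rest ih =>
    simp only [dlzLoopB]
    split
    · rw [ih, ih ((if s && z then [] ++ ['0'] else []) ++ [c])]
      split <;> simp
    · split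
      · split
        · exact ih out true true
        · rw [ih, ih ([] ++ [c])]; simp
      · rw [ih, ih ([] ++ [c])]; simp

-- what B has already emitted for the pending segment `number`
def dlzEmitted (number : List Char) : List Char :=
  if number.all (· = '0') then [] else number.dropWhile (· = '0')

theorem dlz_dropWhile_nil (number : List Char) (hz : number.all (· = '0') = true) :
    number.dropWhile (· = '0') = [] :=
  List.dropWhile_eq_nil_iff.mpr (fun x hx => List.all_eq_true.mp hz x hx)

theorem dlz_dropWhile_ne_nil (number : List Char) (hz : ¬ number.all (· = '0') = true) :
    number.dropWhile (· = '0') ≠ [] := by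
  intro h
  rw [List.dropWhile_eq_nil_iff] at h
  exact hz (List.all_eq_true.mpr (fun x hx => by simpa using h x hx))

-- flushing the pending segment: A's strip equals B's already-emitted part plus the '0' catch-up
theorem dlz_flush (number : List Char) :
    (if number ≠ [] then dlzStrip number else []) =
    dlzEmitted number ++ (if number.all (· = '0') && (!number.isEmpty) then ['0'] else []) := by
  by_cases hz : number.all (· = '0')
  · by_cases he : number = []
    · simp [he, dlzEmitted]
    · by_cases h0 : number = ['0'] <;>
        simp [he, dlzEmitted, dlzStrip, hz, h0, dlz_dropWhile_nil number hz]
  · have hne : number ≠ [] := by rintro rfl; simp at hz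
    have h0 : number ≠ ['0'] := by rintro rfl; simp at hz
    simp [hne, dlzEmitted, dlzStrip, hz, h0, dlz_dropWhile_ne_nil number hz]

theorem dropWhile_append_of_not_all (number : List Char) (c : Char)
    (hz : ¬ number.all (· = '0') = true) :
    (number ++ [c]).dropWhile (· = '0') = number.dropWhile (· = '0') ++ [c] := by
  have hdw : ¬ (number.dropWhile (· = '0')).isEmpty := by
    rw [List.isEmpty_iff]
    exact dlz_dropWhile_ne_nil number hz
  simp [List.dropWhile_append, hdw]

-- main invariant: A's loop with pending segment `number` (no delimiters in it) equals
-- B's already-emitted part of that segment followed by B's loop in the matching state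
theorem dlz_loop_eq (l : List Char) (hne : l ≠ []) :
    ∀ number : List Char, '.' ∉ number → ':' ∉ number →
      dlzLoopA [] number l =
      dlzEmitted number ++
        dlzLoopB [] (number.all (· = '0')) (number.all (· = '0') && (!number.isEmpty)) l := by
  induction l with
  | nil => exact absurd rfl hne
  | cons c rest ih =>
    intro number hd hc
    by_cases hdelim : c = '.' ∨ c = ':'
    · -- delimiter: A flushes `number` and emits c; B catches up the all-zero case and emits c
      simp only [dlzLoopA, if_pos hdelim]
      rw [dlzLoopA_result]
      have hB : dlzLoopB [] (number.all (· = '0'))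
            ((number.all (· = '0')) && (!number.isEmpty)) (c :: rest) =
          (if number.all (· = '0') && (!number.isEmpty) then ['0'] else []) ++ [c] ++
            dlzLoopB [] true false rest := by
        simp only [dlzLoopB, if_pos hdelim]
        rw [dlzLoopB_out]
        cases hz : number.all (· = '0') <;> simp
      rw [hB]
      simp only [List.nil_append]
      by_cases hrest : rest = []
      · subst hrest
        rw [dlz_flush]
        simp [dlzLoopA, dlzLoopB]
      · rw [ih hrest [] (by simp) (by simp), dlz_flush]
        simp [dlzEmitted]
    · -- ordinary character: A appends it to `number`; B updates the flags / emits it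
      have hall : (number ++ [c]).all (· = '0') = (number.all (· = '0') && (c = '0')) := by
        simp [List.all_append]
      simp only [dlzLoopA, if_neg hdelim]
      have hB : dlzLoopB [] (number.all (· = '0'))
            ((number.all (· = '0')) && (!number.isEmpty)) (c :: rest) =
          (if number.all (· = '0') then
            if c = '0' then dlzLoopB [] true true rest
            else [c] ++ dlzLoopB [] false false rest
          else [c] ++ dlzLoopB [] false false rest) := by
        simp only [dlzLoopB, if_neg hdelim]
        cases hz : number.all (· = '0')
        · simp only [Bool.false_eq_true, if_false, Bool.false_and]
          rw [dlzLoopB_out]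
          simp
        · simp only [if_true]
          by_cases h0 : c = '0'
          · simp [h0]
          · simp only [h0, if_false]
            rw [dlzLoopB_out]
            simp
      rw [hB]
      by_cases hz : number.all (· = '0')
      · have hzp : ∀ x ∈ number, x = '0' := fun x hx => by
          simpa using List.all_eq_true.mp hz x hx
        by_cases hrest : rest = []
        · subst hrest
          simp only [List.nil_append]
          have hfl := dlz_flush (number ++ [c])
          rw [if_pos (by simp : number ++ [c] ≠ [])] at hfl
          rw [hfl]
          by_cases h0 : c = '0'
          · subst h0
            have hie : (number ++ ['0']).isEmpty = false := by simp
            simp [dlzEmitted, hz, hall, dlzLoopB, hie]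
          · simp [dlzEmitted, hz, hall, h0, dlzLoopB, List.dropWhile_append,
              dlz_dropWhile_nil number hz]
        · have hd' : '.' ∉ number ++ [c] := by
            simp only [List.mem_append, List.mem_singleton]
            rintro (h | h)
            · exact hd h
            · exact hdelim (Or.inl h.symm)
          have hc' : ':' ∉ number ++ [c] := by
            simp only [List.mem_append, List.mem_singleton]
            rintro (h | h)
            · exact hc h
            · exact hdelim (Or.inr h.symm)
          rw [if_neg hrest, ih hrest (number ++ [c]) hd' hc']
          by_cases h0 : c = '0'
          · subst h0
            have hie : (number ++ ['0']).isEmpty = false := by simp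
            simp [dlzEmitted, hz, hall, hie]
          · simp [dlzEmitted, hz, hall, h0, List.dropWhile_append,
              dlz_dropWhile_nil number hz]
      · have hdw := dropWhile_append_of_not_all number c hz
        have hallf : (number ++ [c]).all (· = '0') = false := by
          simp [hall, hz]
        by_cases hrest : rest = []
        · subst hrest
          simp only [if_neg hz, List.nil_append]
          have hfl := dlz_flush (number ++ [c])
          rw [if_pos (by simp : number ++ [c] ≠ [])] at hfl
          rw [hfl]
          simp [dlzEmitted, hallf, hdw, dlzLoopB, hz]
        · have hd' : '.' ∉ number ++ [c] := by
            simp only [List.mem_append, List.mem_singleton]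
            rintro (h | h)
            · exact hd h
            · exact hdelim (Or.inl h.symm)
          have hc' : ':' ∉ number ++ [c] := by
            simp only [List.mem_append, List.mem_singleton]
            rintro (h | h)
            · exact hc h
            · exact hdelim (Or.inr h.symm)
          rw [if_neg hrest, if_neg hz, ih hrest (number ++ [c]) hd' hc']
          simp [dlzEmitted, hz, hallf, hdw]

-- ===== VERDICT (by name: the statement is the Claim_ definition above) =====
theorem drop_leading_zeros_spec : Claim_equal_drop_leading_zeros := by
  intro text _
  unfold Spec_drop_leading_zeros drop_leading_zeros drop_leading_zeros_alt
  by_cases h : text.toList = []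
  · simp [h, dlzLoopA, dlzLoopB]
  · rw [dlz_loop_eq text.toList h [] (by simp) (by simp)]
    simp [dlzEmitted]
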